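-- pv_equiv track=rewrite | github.com/Elyorcv/Additive-Margin-Face-in-Pytorch-to-run-on-any-laptop | dataset/TripDataset.py | get_idx_path_dict
-- ===== SOURCE A (Python) =====
-- def get_idx_path_dict(imgs):
--     idx_path_dict = {}
--     idx_imgs_count = {}
--     for path,idx in imgs:
--         if not idx in idx_path_dict.keys():
--             idx_path_dict[idx] = [path]
--             idx_imgs_count[idx] = 1
--         else:
--             idx_path_dict[idx].append(path)
--             idx_imgs_count[idx] += 1
--     return idx_path_dict,idx_imgs_count
-- ===== SOURCE B (Python) =====
-- def get_idx_path_dict(imgs):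
--     # pass 1: distinct idx values in first-occurrence order
--     order = []
--     seen = set()
--     for _, idx in imgs:
--         if idx not in seen:
--             seen.add(idx)
--             order.append(idx)
--     # pass 2: for each idx, gather its paths by scanning imgs
--     idx_path_dict = {i: [p for p, j in imgs if j == i] for i in order}
--     idx_imgs_count = {i: len(ps) for i, ps in idx_path_dict.items()}
--     return idx_path_dict, idx_imgs_count
-- ===== Notes on version B (the rewrite author's own statement) =====
-- stated objective: alternative
-- what changed: B replaces A's single pass that incrementally maintains two dicts with a key-directory-then-gather scheme: a first pass collects the distinct idx values in first-occurrence order, then for each such idx a separate scan of imgs collects its paths (and counts fall out as lengths), trading A's O(n) incremental updates for O(n*k) nested scans.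
import Mathlib
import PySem

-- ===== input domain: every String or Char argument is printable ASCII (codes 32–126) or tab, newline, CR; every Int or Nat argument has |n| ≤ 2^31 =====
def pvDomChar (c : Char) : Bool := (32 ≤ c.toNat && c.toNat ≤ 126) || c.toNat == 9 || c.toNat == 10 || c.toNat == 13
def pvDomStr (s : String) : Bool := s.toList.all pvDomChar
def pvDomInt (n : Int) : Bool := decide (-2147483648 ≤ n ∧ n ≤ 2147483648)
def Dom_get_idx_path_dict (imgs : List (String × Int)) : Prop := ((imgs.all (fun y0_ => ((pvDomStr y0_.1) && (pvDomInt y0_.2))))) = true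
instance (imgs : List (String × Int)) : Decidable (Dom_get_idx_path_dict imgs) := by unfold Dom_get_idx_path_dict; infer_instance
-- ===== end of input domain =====

-- B replaces A's single two-dict pass by a key-directory-then-gather scheme:
-- a first pass lists the distinct idx values in first-occurrence order, then each
-- idx's paths are gathered by its own scan of imgs (counts = lengths).
-- Objective: alternative algorithm, same results; not faster.


-- ===== PORT A =====
-- literal port of A: one loop maintaining both idx_path_dict and idx_imgs_count
def get_idx_path_dict (imgs : List (String × Int)) : (List (Int × List String)) × (List (Int × Int)) :=
  let st := imgs.foldl
    (fun (st : PySem.Dict Int (List String) × PySem.Dict Int Int) pi =>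
      if !(st.1.contains pi.2) then
        (st.1.insert pi.2 [pi.1], st.2.insert pi.2 1)
      else
        -- idx_path_dict[idx].append(path); idx_imgs_count[idx] += 1 (key present)
        (st.1.modify pi.2 [] (· ++ [pi.1]), st.2.modify pi.2 0 (· + 1)))
    (PySem.Dict.empty, PySem.Dict.empty)
  (st.1.items, st.2.items)

-- ===== PORT B =====
-- literal port of B: a loop over imgs collecting the distinct idx values in
-- first-occurrence order (order list + seen set); then the dict comprehension
-- {i: [p for p,j in imgs if j == i] for i in order} — its keys (the elements of
-- order) are pairwise distinct, so the built dict's items are exactly the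
-- comprehension's iterations in order, i.e. a map over order — and the count
-- comprehension over its items.
def get_idx_path_dict_alt (imgs : List (String × Int)) : (List (Int × List String)) × (List (Int × Int)) :=
  let st := imgs.foldl
    (fun (st : List Int × PySem.Set Int) pi =>
      if !(st.2.contains pi.2) then (st.1 ++ [pi.2], st.2.add pi.2) else st)
    ([], PySem.Set.empty)
  let items := st.1.map (fun i => (i, (imgs.filter (fun pi => pi.2 == i)).map Prod.fst))
  (items, items.map (fun p => (p.1, (p.2.length : Int))))

-- ===== PRECONDITION & SPEC =====
def Spec_get_idx_path_dict (imgs : List (String × Int)) (out : (List (Int × List String)) × (List (Int × Int))) : Prop := out = get_idx_path_dict_alt imgs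
instance (imgs : List (String × Int)) (out : (List (Int × List String)) × (List (Int × Int))) : Decidable (Spec_get_idx_path_dict imgs out) := by unfold Spec_get_idx_path_dict; infer_instance

-- ===== CLAIM (what is proved, stated in full; the proofs are below) =====
def Claim_equal_get_idx_path_dict : Prop := ∀ (imgs : List (String × Int)), Dom_get_idx_path_dict imgs → Spec_get_idx_path_dict imgs (get_idx_path_dict imgs)

-- ===== LEMMAS AND PROOFS =====

-- paths of l whose idx is i, in order (what B's per-key scan collects)
def pvPw (l : List (String × Int)) (i : Int) : List String :=
  (l.filter (fun pi => pi.2 == i)).map Prod.fst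

theorem pvPw_append (l : List (String × Int)) (x : String × Int) (i : Int) :
    pvPw (l ++ [x]) i = pvPw l i ++ (if x.2 = i then [x.1] else []) := by
  simp [pvPw, List.filter_append]
  by_cases h : x.2 = i <;> simp [h]

theorem pvPw_nil_of_not_mem (l : List (String × Int)) (i : Int)
    (h : i ∉ l.map Prod.snd) : pvPw l i = [] := by
  simp only [pvPw, List.map_eq_nil_iff, List.filter_eq_nil_iff]
  intro pi hpi
  simp only [beq_iff_eq]
  exact fun he => h (he ▸ List.mem_map_of_mem hpi)

-- getD on a dict whose items are a map over keys
theorem pv_getD_mk_map {v : Type} (ord : List Int) (g : Int → v) (k : Int) (d0 : v) :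
    (PySem.Dict.mk (ord.map (fun i => (i, g i)))).getD k d0 = if k ∈ ord then g k else d0 := by
  induction ord with
  | nil => simp [PySem.Dict.getD_eq_get?_getD, PySem.Dict.get?]
  | cons a t ih =>
    by_cases h : a = k
    · simp [PySem.Dict.getD_eq_get?_getD, PySem.Dict.get?_mk_cons, h]
    · have h' : ¬ k = a := fun e => h e.symm
      simpa [PySem.Dict.getD_eq_get?_getD, PySem.Dict.get?_mk_cons, h, h'] using ih

-- the central invariant: A's two dicts are determined by B's order list and pvPw
theorem pv_inv (l : List (String × Int)) :
    (l.foldl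
      (fun (st : PySem.Dict Int (List String) × PySem.Dict Int Int) pi =>
        if !(st.1.contains pi.2) then
          (st.1.insert pi.2 [pi.1], st.2.insert pi.2 1)
        else
          (st.1.modify pi.2 [] (· ++ [pi.1]), st.2.modify pi.2 0 (· + 1)))
      (PySem.Dict.empty, PySem.Dict.empty)).1
      = PySem.Dict.mk ((l.foldl
          (fun (st : List Int × PySem.Set Int) pi =>
            if !(st.2.contains pi.2) then (st.1 ++ [pi.2], st.2.add pi.2) else st)
          ([], PySem.Set.empty)).1.map (fun i => (i, pvPw l i)))
    ∧ (l.foldl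
      (fun (st : PySem.Dict Int (List String) × PySem.Dict Int Int) pi =>
        if !(st.1.contains pi.2) then
          (st.1.insert pi.2 [pi.1], st.2.insert pi.2 1)
        else
          (st.1.modify pi.2 [] (· ++ [pi.1]), st.2.modify pi.2 0 (· + 1)))
      (PySem.Dict.empty, PySem.Dict.empty)).2
      = PySem.Dict.mk ((l.foldl
          (fun (st : List Int × PySem.Set Int) pi =>
            if !(st.2.contains pi.2) then (st.1 ++ [pi.2], st.2.add pi.2) else st)
          ([], PySem.Set.empty)).1.map (fun i => (i, ((pvPw l i).length : Int))))
    ∧ (∀ x : Int, (l.foldl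
          (fun (st : List Int × PySem.Set Int) pi =>
            if !(st.2.contains pi.2) then (st.1 ++ [pi.2], st.2.add pi.2) else st)
          ([], PySem.Set.empty)).2.contains x
        = decide (x ∈ (l.foldl
          (fun (st : List Int × PySem.Set Int) pi =>
            if !(st.2.contains pi.2) then (st.1 ++ [pi.2], st.2.add pi.2) else st)
          ([], PySem.Set.empty)).1))
    ∧ (∀ x : Int, x ∈ (l.foldl
          (fun (st : List Int × PySem.Set Int) pi =>
            if !(st.2.contains pi.2) then (st.1 ++ [pi.2], st.2.add pi.2) else st)
          ([], PySem.Set.empty)).1 ↔ x ∈ l.map Prod.snd) := by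
  induction l using List.reverseRecOn with
  | nil =>
    refine ⟨rfl, rfl, ?_, ?_⟩ <;> intro x <;> simp [PySem.Set.empty]
  | append_singleton l x ih =>
    obtain ⟨ih1, ih2, ih3, ih4⟩ := ih
    simp only [List.foldl_append, List.foldl_cons, List.foldl_nil]
    rw [ih1, ih2]
    have hcond : ∀ y : Int,
        (PySem.Dict.mk ((l.foldl
            (fun (st : List Int × PySem.Set Int) pi =>
              if !(st.2.contains pi.2) then (st.1 ++ [pi.2], st.2.add pi.2) else st)
            ([], PySem.Set.empty)).1.map (fun i => (i, pvPw l i)))).contains y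
          = decide (y ∈ (l.foldl
            (fun (st : List Int × PySem.Set Int) pi =>
              if !(st.2.contains pi.2) then (st.1 ++ [pi.2], st.2.add pi.2) else st)
            ([], PySem.Set.empty)).1) := by
      intro y
      rw [PySem.Dict.contains_eq_decide_mem_keys]
      simp [PySem.Dict.keys, List.map_map, Function.comp_def]
    by_cases hm : x.2 ∈ (l.foldl
        (fun (st : List Int × PySem.Set Int) pi =>
          if !(st.2.contains pi.2) then (st.1 ++ [pi.2], st.2.add pi.2) else st)
        ([], PySem.Set.empty)).1
    · -- key already seen: A modifies both dicts, B leaves its state unchanged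
      simp only [hcond, ih3, hm, decide_true, Bool.not_true, Bool.false_eq_true, if_false]
      refine ⟨?_, ?_, ?_, ?_⟩
      · -- modify = in-place update of the x.2 entry
        simp only [PySem.Dict.modify, pv_getD_mk_map, hm, if_true]
        apply PySem.Dict.ext
        rw [PySem.Dict.items_insert_of_contains _ _ (by rw [hcond]; simpa using hm)]
        simp only [List.map_map]
        apply List.map_congr_left
        intro i hi
        by_cases h : i = x.2
        · simp [h, pvPw_append]
        · have h2 : ¬ x.2 = i := Ne.symm h
          simp [h, pvPw_append, h2]
      · simp only [PySem.Dict.modify, pv_getD_mk_map, hm, if_true]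
        apply PySem.Dict.ext
        rw [PySem.Dict.items_insert_of_contains _ _ (by
          rw [PySem.Dict.contains_eq_decide_mem_keys]
          simpa [PySem.Dict.keys, List.map_map, Function.comp_def] using hm)]
        simp only [List.map_map]
        apply List.map_congr_left
        intro i hi
        by_cases h : i = x.2
        · simp [h, pvPw_append]
        · have h2 : ¬ x.2 = i := Ne.symm h
          simp [h, pvPw_append, h2]
      · intro _; trivial
      · intro y
        simp only [List.map_append, List.mem_append, List.map_cons, List.map_nil,
          List.mem_singleton]
        constructor
        · intro h; exact Or.inl ((ih4 y).mp h)
        · rintro (h | h)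
          · exact (ih4 y).mpr h
          · exact h ▸ hm
    · -- fresh key: A inserts into both dicts, B appends to order and seen
      simp only [hcond, ih3, hm, decide_false, Bool.not_false, reduceIte]
      have hx2s : x.2 ∉ (l.foldl
          (fun (st : List Int × PySem.Set Int) pi =>
            if !(st.2.contains pi.2) then (st.1 ++ [pi.2], st.2.add pi.2) else st)
          ([], PySem.Set.empty)).2 := by
        intro hmem
        have := (PySem.Set.contains_iff _ _).mpr hmem
        rw [ih3] at this
        exact hm (by simpa using this)
      have hnil : pvPw l x.2 = [] :=
        pvPw_nil_of_not_mem l x.2 (fun h => hm ((ih4 x.2).mpr h))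
      refine ⟨?_, ?_, ?_, ?_⟩
      · apply PySem.Dict.ext
        rw [PySem.Dict.items_insert_of_not_contains _ _ (by rw [hcond]; simpa using hm)]
        simp only [List.map_append, List.map_cons, List.map_nil]
        congr 1
        · apply List.map_congr_left
          intro i hi
          have h : ¬ x.2 = i := fun e => hm (e ▸ hi)
          simp [pvPw_append, h]
        · simp [pvPw_append, hnil]
      · apply PySem.Dict.ext
        rw [PySem.Dict.items_insert_of_not_contains _ _ (by
          rw [PySem.Dict.contains_eq_decide_mem_keys]
          simpa [PySem.Dict.keys, List.map_map, Function.comp_def] using hm)]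
        simp only [List.map_append, List.map_cons, List.map_nil]
        congr 1
        · apply List.map_congr_left
          intro i hi
          have h : ¬ x.2 = i := fun e => hm (e ▸ hi)
          simp [pvPw_append, h]
        · simp [pvPw_append, hnil]
      · intro y
        rw [PySem.Set.add_of_not_mem hx2s, Bool.eq_iff_iff]
        have hsy : y ∈ (l.foldl
            (fun (st : List Int × PySem.Set Int) pi =>
              if !(st.2.contains pi.2) then (st.1 ++ [pi.2], st.2.add pi.2) else st)
            ([], PySem.Set.empty)).2 ↔ y ∈ (l.foldl
            (fun (st : List Int × PySem.Set Int) pi =>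
              if !(st.2.contains pi.2) then (st.1 ++ [pi.2], st.2.add pi.2) else st)
            ([], PySem.Set.empty)).1 := by
          rw [← PySem.Set.contains_iff, ih3]
          simp
        simp only [PySem.Set.contains_iff, List.mem_append, List.mem_singleton,
          decide_eq_true_eq]
        tauto
      · intro y
        simp only [List.map_append, List.mem_append, List.map_cons, List.map_nil,
          List.mem_singleton, ih4]

-- ===== VERDICT (by name: the statement is the Claim_ definition above) =====
theorem get_idx_path_dict_spec : Claim_equal_get_idx_path_dict := by
  intro imgs _
  unfold Spec_get_idx_path_dict get_idx_path_dict get_idx_path_dict_alt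
  obtain ⟨h1, h2, -, -⟩ := pv_inv imgs
  simp only [h1, h2, pvPw]
  simp [List.map_map, Function.comp_def]
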